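-- pv_equiv track=rewrite | github.com/cam-nagara/B-Name | operators/spread_op.py | _reallocate_balloon_id
-- ===== SOURCE A (Python) =====
-- def _reallocate_balloon_id(used_ids: set[str]) -> str:
--     """新しい balloon id を採番。``used_ids`` と衝突しないように."""
--     i = 1
--     while True:
--         candidate = f"balloon_{i:04d}"
--         if candidate not in used_ids:
--             used_ids.add(candidate)
--             return candidate
--         i += 1
-- ===== SOURCE B (Python) =====
-- def _reallocate_balloon_id(used_ids: set[str]) -> str:
--     """新しい balloon id を採番。``used_ids`` と衝突しないように."""
--     # Collect the integers whose canonical zero-padded id is present, then walk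
--     # the sorted list with an expected counter to find the smallest free number.
--     nums = []
--     for s in used_ids:
--         if s.startswith("balloon_"):
--             rest = s[8:]
--             if rest.isdigit():
--                 n = int(rest)
--                 if s == f"balloon_{n:04d}":
--                     nums.append(n)
--     i = 1
--     for n in sorted(nums):
--         if n == i:
--             i += 1
--         elif n > i:
--             break
--     candidate = f"balloon_{i:04d}"
--     used_ids.add(candidate)
--     return candidate
-- ===== Notes on version B (the rewrite author's own statement) =====
-- stated objective: alternative
-- what changed: Instead of probing candidate ids balloon_0001, balloon_0002, ... against the set one by one, B parses used_ids once into the integers whose canonical balloon_NNNN rendering is present, sorts them, and walks the sorted list with an expected counter to find the smallest free number directly.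
import Mathlib
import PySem

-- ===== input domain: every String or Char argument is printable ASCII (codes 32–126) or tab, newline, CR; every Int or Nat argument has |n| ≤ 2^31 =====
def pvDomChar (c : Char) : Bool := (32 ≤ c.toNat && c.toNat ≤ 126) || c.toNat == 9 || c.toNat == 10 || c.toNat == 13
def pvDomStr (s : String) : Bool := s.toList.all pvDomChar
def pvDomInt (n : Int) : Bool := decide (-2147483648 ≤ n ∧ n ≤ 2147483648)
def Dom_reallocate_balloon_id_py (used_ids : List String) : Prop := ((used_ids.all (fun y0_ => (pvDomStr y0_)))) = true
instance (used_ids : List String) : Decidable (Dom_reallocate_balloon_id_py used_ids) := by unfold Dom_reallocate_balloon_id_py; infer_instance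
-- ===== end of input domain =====

-- B replaces A's probe loop over candidate ids by parse-sort-scan over used_ids (alternative
-- decomposition, not faster). Both Pythons also add the returned id to used_ids in place; the
-- equivalence proved here is about the return value only (B performs the same mutation).


-- ===== PORT A =====
-- f"balloon_{i:04d}" = "balloon_" + str(i).zfill(4); ported via PySem's zero-fill (exact for all ints)
def pvFmtC (i : Int) : List Char := "balloon_".toList ++ PySem.Chars.zfill (PySem.Int.toChars i) 4
def pvFmt (i : Int) : String := String.ofList (pvFmtC i)

-- A's 'while True' probe loop; the fuel argument only makes the same computation total
-- (the proofs show fuel used_ids.length + 1 is never exhausted before the loop returns)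
def pvLoopA (used : List String) (i : Int) : Nat → String
  | 0 => pvFmt i
  | fuel + 1 =>
    let candidate := pvFmt i
    if candidate ∈ used then pvLoopA used (i + 1) fuel else candidate

def reallocate_balloon_id_py (used_ids : List String) : String :=
  pvLoopA used_ids 1 (used_ids.length + 1)

-- ===== PORT B =====
-- hand port of Source B's standard-library call int(rest): the call is guarded by rest.isdigit(),
-- and on such digit-only strings int(rest) is exactly this decimal fold over the characters
def pvParse (cs : List Char) : Int := cs.foldl (fun n ch => n * 10 + ((ch.toNat : Int) - 48)) 0

-- the body of B's first loop: the integer n with s == f"balloon_{n:04d}", if any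
def pvDecode (s : String) : Option Int :=
  if PySem.Str.startswith s "balloon_" then
    if PySem.Str.strIsdigit (PySem.Str.slice s (some 8) none) then
      if s == pvFmt (pvParse (PySem.Str.slice s (some 8) none).toList) then
        some (pvParse (PySem.Str.slice s (some 8) none).toList)
      else none
    else none
  else none

-- B's second loop: walk the sorted numbers with the expected counter i
def pvScan : List Int → Int → Int
  | [], i => i
  | n :: rest, i =>
    if n = i then pvScan rest (i + 1)
    else if n > i then i
    else pvScan rest i

def reallocate_balloon_id_py_alt (used_ids : List String) : String :=
  let nums := used_ids.filterMap pvDecode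
  pvFmt (pvScan (PySem.List.sorted nums (fun x => x) false) 1)

-- ===== PRECONDITION & SPEC =====
def Spec_reallocate_balloon_id_py (used_ids : List String) (out : String) : Prop := out = reallocate_balloon_id_py_alt used_ids
instance (used_ids : List String) (out : String) : Decidable (Spec_reallocate_balloon_id_py used_ids out) := by unfold Spec_reallocate_balloon_id_py; infer_instance

-- ===== CLAIM (what is proved, stated in full; the proofs are below) =====
def Claim_equal_reallocate_balloon_id_py : Prop := ∀ (used_ids : List String), Dom_reallocate_balloon_id_py used_ids → Spec_reallocate_balloon_id_py used_ids (reallocate_balloon_id_py used_ids)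

-- ===== LEMMAS AND PROOFS =====

lemma pv_digitChar_toNat (m : Nat) (h : m < 10) : (Nat.digitChar m).toNat = 48 + m := by
  interval_cases m <;> rfl

lemma pv_parse_toDigits (n : Nat) : ∀ a : Int,
    List.foldl (fun n ch => n * 10 + ((ch.toNat : Int) - 48)) a (Nat.toDigits 10 n)
      = a * 10 ^ (Nat.toDigits 10 n).length + n := by
  induction n using Nat.strong_induction_on with
  | _ n ih =>
    intro a
    by_cases h : n < 10
    · rw [Nat.toDigits_of_lt_base h]
      simp only [List.foldl_cons, List.foldl_nil, List.length_cons, List.length_nil,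
        pv_digitChar_toNat n h, pow_succ, pow_zero, one_mul]
      push_cast; omega
    · rw [Nat.toDigits_of_base_le (by norm_num) (by omega)]
      rw [List.foldl_append, ih (n / 10) (by omega)]
      simp only [List.foldl_cons, List.foldl_nil, List.length_append, List.length_cons,
        List.length_nil, pv_digitChar_toNat (n % 10) (by omega)]
      rw [show (Nat.toDigits 10 (n / 10)).length + (0 + 1)
            = (Nat.toDigits 10 (n / 10)).length + 1 from by omega, pow_succ, ← mul_assoc]
      generalize a * 10 ^ (Nat.toDigits 10 (n / 10)).length = K
      push_cast; omega

lemma pv_parse_zeros (k : Nat) (ds : List Char) :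
    pvParse (List.replicate k '0' ++ ds) = pvParse ds := by
  induction k with
  | zero => simp
  | succ k ih =>
    unfold pvParse at *
    simpa [List.replicate_succ, List.foldl] using ih

lemma pv_isdigit_of_isDigit (c : Char) (h : c.isDigit = true) : PySem.Chars.isdigit c = true := by
  simp [Char.isDigit, UInt32.le_iff_toNat_le] at h
  simp [PySem.Chars.isdigit, Char.le_def, UInt32.le_iff_toNat_le]
  constructor <;> [exact h.1; exact h.2]

lemma pv_zfill_digits (cs : List Char) (hne : cs ≠ [])
    (hd : ∀ c ∈ cs, PySem.Chars.isdigit c = true) :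
    PySem.Chars.zfill cs 4 = List.replicate (4 - cs.length) '0' ++ cs := by
  unfold PySem.Chars.zfill
  by_cases h4 : (4 : Int) ≤ (cs.length : Int)
  · rw [if_pos h4]
    have : 4 - cs.length = 0 := by omega
    simp [this]
  · rw [if_neg h4]
    match cs, hne with
    | c :: rest, _ =>
      have hc : PySem.Chars.isdigit c = true := hd c (List.mem_cons_self ..)
      have hplus : ¬(c = '+' ∨ c = '-') := by
        rintro (rfl | rfl) <;> simp [PySem.Chars.isdigit] at hc
      simp [hplus]

lemma pv_toList_fmt (i : Int) : (pvFmt i).toList = pvFmtC i := by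
  simp [pvFmt]

-- the zero-padded digit block of pvFmt i, for 0 ≤ i
lemma pv_fmt_eq (i : Int) (h : 0 ≤ i) :
    pvFmtC i = "balloon_".toList ++
      (List.replicate (4 - (Nat.toDigits 10 i.toNat).length) '0' ++ Nat.toDigits 10 i.toNat) := by
  have hch : PySem.Int.toChars i = Nat.toDigits 10 i.toNat := by
    simp [PySem.Int.toChars, not_lt.mpr h]
  have hne : Nat.toDigits 10 i.toNat ≠ [] := by
    have := @Nat.length_toDigits_pos 10 i.toNat
    intro hc; rw [hc] at this; simp at this
  have hd : ∀ c ∈ Nat.toDigits 10 i.toNat, PySem.Chars.isdigit c = true := fun c hc =>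
    pv_isdigit_of_isDigit c (Nat.isDigit_of_mem_toDigits (by norm_num) (by norm_num) hc)
  rw [pvFmtC, hch, pv_zfill_digits _ hne hd]

lemma pv_decode_sound (s : String) (n : Int) (h : pvDecode s = some n) : s = pvFmt n := by
  unfold pvDecode at h
  split_ifs at h with h1 h2 h3
  · rw [Option.some_inj] at h
    rw [← h]
    exact eq_of_beq h3

lemma pv_decode_fmt (i : Int) (h : 0 ≤ i) : pvDecode (pvFmt i) = some i := by
  have hfmt := pv_fmt_eq i h
  set ds := Nat.toDigits 10 i.toNat with hds
  set Z : List Char := List.replicate (4 - ds.length) '0' ++ ds with hZ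
  have htl : (pvFmt i).toList = "balloon_".toList ++ Z := by rw [pv_toList_fmt, hfmt]
  have hZd : ∀ c ∈ Z, PySem.Chars.isdigit c = true := by
    intro c hc
    rcases List.mem_append.mp hc with hc | hc
    · rw [List.eq_of_mem_replicate hc]; decide
    · exact pv_isdigit_of_isDigit c (Nat.isDigit_of_mem_toDigits (by norm_num) (by norm_num) hc)
  have hdne : ds ≠ [] := by
    have := @Nat.length_toDigits_pos 10 i.toNat
    intro hc; rw [hds] at hc; rw [hc] at this; simp at this
  have hZne : Z ≠ [] := by
    intro hc
    exact hdne (List.append_eq_nil_iff.mp hc).2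
  have hstart : PySem.Str.startswith (pvFmt i) "balloon_" = true := by
    simp [PySem.Str.startswith, PySem.Chars.startswith, htl]
  have hrest : (PySem.Str.slice (pvFmt i) (some 8) none).toList = Z := by
    simp only [PySem.Str.slice, String.toList_ofList, PySem.Chars.slice_eq_listSlice, htl]
    rw [show (8 : Int) = ((8 : Nat) : Int) from rfl, PySem.List.slice_from_natCast]
    rw [show (8 : Nat) = ("balloon_".toList).length from by decide, List.drop_left]
  have hdig : PySem.Str.strIsdigit (PySem.Str.slice (pvFmt i) (some 8) none) = true := by
    simp [PySem.Str.strIsdigit, PySem.Chars.strIsdigit, hrest, hZne, List.all_eq_true.mpr hZd]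
  have hparse : pvParse (PySem.Str.slice (pvFmt i) (some 8) none).toList = i := by
    rw [hrest, hZ, pv_parse_zeros]
    unfold pvParse
    rw [pv_parse_toDigits i.toNat 0]
    simp [Int.toNat_of_nonneg h]
  unfold pvDecode
  rw [if_pos hstart, if_pos hdig, hparse, if_pos (by simp)]

-- numbers collected by B, as membership facts about used
lemma pv_mem_nums_of_fmt_mem (used : List String) (j : Int) (h0 : 0 ≤ j)
    (h : pvFmt j ∈ used) : j ∈ used.filterMap pvDecode :=
  List.mem_filterMap.mpr ⟨pvFmt j, h, pv_decode_fmt j h0⟩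

lemma pv_fmt_mem_of_mem_nums (used : List String) (n : Int)
    (h : n ∈ used.filterMap pvDecode) : pvFmt n ∈ used := by
  obtain ⟨s, hs, hdec⟩ := List.mem_filterMap.mp h
  rwa [pv_decode_sound s n hdec] at hs

-- characterisation of B's counter scan on a sorted list
lemma pv_scan_spec : ∀ (l : List Int), l.Pairwise (· ≤ ·) → ∀ i : Int,
    i ≤ pvScan l i ∧ pvScan l i ∉ l ∧ ∀ j, i ≤ j → j < pvScan l i → j ∈ l := by
  intro l
  induction l with
  | nil => intro _ i; refine ⟨le_refl i, by simp, ?_⟩; intro j h1 h2; simp [pvScan] at h2; omega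
  | cons n rest ih =>
    intro hp i
    have hhead : ∀ m ∈ rest, n ≤ m := (List.pairwise_cons.mp hp).1
    have hrest := ih (List.pairwise_cons.mp hp).2
    by_cases he : n = i
    · subst he
      obtain ⟨h1, h2, h3⟩ := hrest (n + 1)
      rw [show pvScan (n :: rest) n = pvScan rest (n + 1) from by simp [pvScan]]
      refine ⟨by omega, ?_, ?_⟩
      · intro hc
        rcases List.mem_cons.mp hc with hc | hc
        · omega
        · exact h2 hc
      · intro j hj1 hj2
        by_cases hji : j = n
        · simp [hji]
        · exact List.mem_cons_of_mem _ (h3 j (by omega) hj2)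
    · by_cases hgt : n > i
      · rw [show pvScan (n :: rest) i = i from by simp [pvScan, he, hgt]]
        refine ⟨le_refl i, ?_, ?_⟩
        · intro hc
          rcases List.mem_cons.mp hc with hc | hc
          · omega
          · have := hhead i hc; omega
        · intro j h1 h2; omega
      · obtain ⟨h1, h2, h3⟩ := hrest i
        rw [show pvScan (n :: rest) i = pvScan rest i from by simp [pvScan, he, hgt]]
        refine ⟨h1, ?_, ?_⟩
        · intro hc
          rcases List.mem_cons.mp hc with hc | hc
          · omega
          · exact h2 hc
        · intro j hj1 hj2
          exact List.mem_cons_of_mem _ (h3 j hj1 hj2)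

-- A's probe loop returns pvFmt t when t is the first free index ≥ i and the fuel suffices
lemma pv_loopA_spec : ∀ (fuel : Nat) (used : List String) (i t : Int),
    i ≤ t → t - i ≤ (fuel : Int) →
    (∀ j, i ≤ j → j < t → pvFmt j ∈ used) → pvFmt t ∉ used →
    pvLoopA used i fuel = pvFmt t := by
  intro fuel
  induction fuel with
  | zero =>
    intro used i t h1 h2 _ _
    have : i = t := by omega
    simp [pvLoopA, this]
  | succ fuel ih =>
    intro used i t h1 h2 hmem hfree
    by_cases hc : pvFmt i ∈ used
    · have hne : i ≠ t := by intro he; rw [he] at hc; exact hfree hc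
      rw [show pvLoopA used i (fuel + 1) = pvLoopA used (i + 1) fuel from by
        simp [pvLoopA, hc]]
      exact ih used (i + 1) t (by omega) (by push_cast at h2 ⊢; omega)
        (fun j hj1 hj2 => hmem j (by omega) hj2) hfree
    · have hit : i = t := by
        by_contra hne
        exact hc (hmem i (le_refl i) (by omega))
      subst hit
      simp [pvLoopA, hc]

-- pvFmt is injective on the nonnegative integers
lemma pv_fmt_inj (a b : Int) (ha : 0 ≤ a) (hb : 0 ≤ b) (h : pvFmt a = pvFmt b) : a = b := by
  have := pv_decode_fmt a ha
  rw [h, pv_decode_fmt b hb] at this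
  exact (Option.some_injective _ this).symm

-- ===== VERDICT (by name: the statement is the Claim_ definition above) =====
theorem reallocate_balloon_id_py_spec : Claim_equal_reallocate_balloon_id_py := by
  intro used _
  unfold Spec_reallocate_balloon_id_py reallocate_balloon_id_py reallocate_balloon_id_py_alt
  set nums := used.filterMap pvDecode with hnums
  set l := PySem.List.sorted nums (fun x => x) false with hl
  have hpw : l.Pairwise (· ≤ ·) := by
    simpa using PySem.List.sorted_pairwise nums (fun x => x)
  obtain ⟨h1, h2, h3⟩ := pv_scan_spec l hpw 1
  set t := pvScan l 1 with ht
  -- every index in [1, t) is used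
  have hmem : ∀ j : Int, 1 ≤ j → j < t → pvFmt j ∈ used := by
    intro j hj1 hj2
    have : j ∈ l := h3 j hj1 hj2
    rw [hl, PySem.List.mem_sorted] at this
    exact pv_fmt_mem_of_mem_nums used j this
  -- t itself is free
  have hfree : pvFmt t ∉ used := by
    intro hc
    have : t ∈ nums := pv_mem_nums_of_fmt_mem used t (by omega) hc
    exact h2 (by rw [hl, PySem.List.mem_sorted]; exact this)
  -- pigeonhole: the t - 1 distinct used ids bound t
  have hfuel : t - 1 ≤ (used.length : Int) := by
    set k := (t - 1).toNat with hk
    set L := (List.range k).map (fun m : Nat => pvFmt (1 + m)) with hL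
    have hnodup : L.Nodup := by
      refine List.Nodup.map_on ?_ (List.nodup_range)
      intro x _ y _ hxy
      have := pv_fmt_inj (1 + x) (1 + y) (by positivity) (by positivity) hxy
      omega
    have hsub : L ⊆ used := by
      intro s hs
      obtain ⟨m, hm, rfl⟩ := List.mem_map.mp hs
      rw [List.mem_range] at hm
      exact hmem (1 + m) (by omega) (by omega)
    have := (List.subperm_of_subset hnodup hsub).length_le
    rw [hL] at this
    simp at this
    omega
  calc pvLoopA used 1 (used.length + 1)
      = pvFmt t := pv_loopA_spec (used.length + 1) used 1 t h1 (by push_cast; omega) hmem hfree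
    _ = pvFmt (pvScan l 1) := by rw [ht]
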